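-- pv_equiv track=rewrite | github.com/skills-cogrammar/C5-Software-Engineering-Lecture-Backpack | Week 15/2 - Open Class/5 - Friday/w15d5_open_session_demo.py | column_sums
-- ===== SOURCE A (Python) =====
-- def column_sums(grid):
--     num_rows = len(grid)
--     num_cols = len(grid[0]) if grid else 0
--
--     sums = [0] * num_cols # [0,0,0]
--
--     for row in grid:
--         for col in range(num_cols):
--             sums[col] += row[col]
--
--     return sums
-- ===== SOURCE B (Python) =====
-- def column_sums(grid):
--     num_cols = len(grid[0]) if grid else 0
--     return [sum(row[c] for row in grid) for c in range(num_cols)]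
-- ===== Notes on version B (the rewrite author's own statement) =====
-- stated objective: idiomatic
-- what changed: Swaps the loop nesting to column-outer/row-inner: each column total is computed by one independent sum over the rows in a comprehension, dropping A's mutable accumulator list entirely.
import Mathlib
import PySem

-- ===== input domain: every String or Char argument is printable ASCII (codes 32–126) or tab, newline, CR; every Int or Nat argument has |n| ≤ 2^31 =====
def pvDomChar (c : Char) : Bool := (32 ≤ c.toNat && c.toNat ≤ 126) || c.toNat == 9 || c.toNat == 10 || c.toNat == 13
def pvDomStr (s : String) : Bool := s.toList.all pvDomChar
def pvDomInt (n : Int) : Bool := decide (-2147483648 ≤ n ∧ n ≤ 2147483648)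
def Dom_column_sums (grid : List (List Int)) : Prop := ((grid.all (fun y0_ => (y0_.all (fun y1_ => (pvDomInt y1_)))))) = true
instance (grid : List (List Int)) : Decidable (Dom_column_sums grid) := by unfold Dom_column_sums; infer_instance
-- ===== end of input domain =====

-- B computes each column total independently (column-outer/row-inner) instead of A's
-- row-outer loop mutating an accumulator list; same cost, more idiomatic.

-- ===== PORT A =====
-- num_cols = len(grid[0]) if grid else 0
def pvNumCols (grid : List (List Int)) : Nat :=
  match grid with
  | [] => 0
  | r :: _ => r.length

-- sums = [0]*num_cols; for row in grid: for col in range(num_cols): sums[col] += row[col]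
-- row[col]/sums[col] are in range under Pre_column_sums, so getD 0 is exact there.
def column_sums (grid : List (List Int)) : List Int :=
  let num_cols := pvNumCols grid
  let sums := List.replicate num_cols (0 : Int)
  grid.foldl (fun sums row =>
    (List.range num_cols).foldl
      (fun s col => s.set col (s.getD col 0 + row.getD col 0)) sums) sums

-- ===== PORT B =====
-- [sum(row[c] for row in grid) for c in range(num_cols)]
def column_sums_alt (grid : List (List Int)) : List Int :=
  let num_cols := pvNumCols grid
  (List.range num_cols).map (fun c => grid.foldl (fun acc row => acc + row.getD c 0) 0)

-- ===== PRECONDITION & SPEC =====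
-- Pre_ excludes ragged grids in which some row is shorter than the first row: there
-- Python A (and B alike) raises IndexError on row[col].
def Pre_column_sums (grid : List (List Int)) : Prop :=
  ∀ row ∈ grid, pvNumCols grid ≤ row.length
instance (grid : List (List Int)) : Decidable (Pre_column_sums grid) := by
  unfold Pre_column_sums; infer_instance

def pvWitness_column_sums : List (List Int) := [[1, 2, 3], [4, 5, 6]]

def Spec_column_sums (grid : List (List Int)) (out : List Int) : Prop := out = column_sums_alt grid
instance (grid : List (List Int)) (out : List Int) : Decidable (Spec_column_sums grid out) := by unfold Spec_column_sums; infer_instance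

-- ===== CLAIM (what is proved, stated in full; the proofs are below) =====
def Claim_equal_column_sums : Prop := ∀ (grid : List (List Int)), Dom_column_sums grid → Pre_column_sums grid → Spec_column_sums grid (column_sums grid)

-- ===== LEMMAS AND PROOFS =====

-- The inner loop of A preserves the length of sums.
theorem inner_length (row : List Int) (l : List Nat) (s : List Int) :
    (l.foldl (fun s col => s.set col (s.getD col 0 + row.getD col 0)) s).length
      = s.length := by
  induction l generalizing s with
  | nil => rfl
  | cons c l ih => simp only [List.foldl_cons]; rw [ih]; simp

-- Element-wise effect of the inner loop over range' a m.
theorem inner_getD (row : List Int) (m : Nat) : ∀ (a : Nat) (s : List Int), a + m ≤ s.length →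
    ∀ i, ((List.range' a m).foldl (fun s col => s.set col (s.getD col 0 + row.getD col 0)) s).getD i 0
      = if a ≤ i ∧ i < a + m then s.getD i 0 + row.getD i 0 else s.getD i 0 := by
  induction m with
  | zero => intro a s _ i; simp
  | succ m ih =>
    intro a s h i
    rw [List.range'_succ]
    simp only [List.foldl_cons]
    rw [ih (a + 1) _ (by simpa [List.length_set] using (by omega : a + 1 + m ≤ s.length)) i]
    have ha : a < s.length := by omega
    by_cases hia : i = a
    · subst hia
      have hno : ¬ (i + 1 ≤ i ∧ i < i + 1 + m) := by omega
      have hset : (s.set i (s.getD i 0 + row.getD i 0)).getD i 0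
          = s.getD i 0 + row.getD i 0 := by
        simp [List.getD, ha]
      rw [if_neg hno, hset, if_pos (by omega)]
    · have hne : a ≠ i := fun h' => hia h'.symm
      have hset : (s.set a (s.getD a 0 + row.getD a 0)).getD i 0 = s.getD i 0 := by
        simp [List.getD, List.getElem?_set_ne hne]
      rw [hset]
      by_cases hcase : a + 1 ≤ i ∧ i < a + 1 + m
      · rw [if_pos hcase, if_pos (by omega)]
      · rw [if_neg hcase, if_neg (by omega)]

-- Shift lemma for the accumulated sum in B's fold.
theorem foldl_add_shift (c : Nat) : ∀ (rows : List (List Int)) (a : Int),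
    rows.foldl (fun acc row => acc + row.getD c 0) a
      = a + rows.foldl (fun acc row => acc + row.getD c 0) 0 := by
  intro rows
  induction rows with
  | nil => simp
  | cons r rs ih =>
    intro a
    simp only [List.foldl_cons]
    rw [ih (a + r.getD c 0), ih (0 + r.getD c 0)]
    ring

-- A's outer fold, characterised element-wise.
theorem rows_getD (n : Nat) : ∀ (rows : List (List Int)) (s : List Int), s.length = n →
    (∀ row ∈ rows, n ≤ row.length) →
    ∀ i, i < n →
      ((rows.foldl (fun sums row =>
          (List.range n).foldl
            (fun s col => s.set col (s.getD col 0 + row.getD col 0)) sums) s).getD i 0)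
        = s.getD i 0 + rows.foldl (fun acc row => acc + row.getD i 0) 0 := by
  intro rows
  induction rows with
  | nil => intro s hs _ i hi; simp
  | cons r rs ih =>
    intro s hs hrows i hi
    simp only [List.foldl_cons]
    have hinner : ∀ j, ((List.range n).foldl
        (fun s col => s.set col (s.getD col 0 + r.getD col 0)) s).getD j 0
          = if 0 ≤ j ∧ j < 0 + n then s.getD j 0 + r.getD j 0 else s.getD j 0 := by
      intro j
      rw [List.range_eq_range']
      exact inner_getD r n 0 s (by omega) j
    have hlen' : ((List.range n).foldl
        (fun s col => s.set col (s.getD col 0 + r.getD col 0)) s).length = n :=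
      (inner_length r (List.range n) s).trans hs
    rw [ih _ hlen' (fun row hm => hrows row (List.mem_cons_of_mem _ hm)) i hi]
    rw [hinner i, if_pos (by omega)]
    rw [foldl_add_shift i rs (0 + r.getD i 0)]
    ring

-- A's outer fold preserves length.
theorem rows_length (n : Nat) (rows : List (List Int)) (s : List Int) :
    (rows.foldl (fun sums row =>
        (List.range n).foldl
          (fun s col => s.set col (s.getD col 0 + row.getD col 0)) sums) s).length
      = s.length := by
  induction rows generalizing s with
  | nil => rfl
  | cons r rs ih =>
    simp only [List.foldl_cons]
    rw [ih]
    exact inner_length r _ s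

-- ===== VERDICT (by name: the statement is the Claim_ definition above) =====
theorem column_sums_spec : Claim_equal_column_sums := by
  intro grid _ hpre
  unfold Spec_column_sums column_sums column_sums_alt
  set n := pvNumCols grid with hn
  apply List.ext_getElem
  · rw [rows_length]; simp
  · intro i h1 h2
    have hi : i < n := by
      have hl := rows_length n grid (List.replicate n (0 : Int))
      rw [hl, List.length_replicate] at h1
      exact h1
    have hA := rows_getD n grid (List.replicate n (0 : Int)) (by simp)
      (fun row hm => hpre row hm) i hi
    have hgetD : ∀ (l : List Int) (j : Nat) (hj : j < l.length), l[j] = l.getD j 0 := by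
      intro l j hj
      simp [List.getD, List.getElem?_eq_getElem hj]
    rw [hgetD _ i h1, hgetD _ i h2, hA]
    simp [hi]
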